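-- pv_equiv track=rewrite | github.com/chandrasekharreddy-7/python | exercise-5/4.py | evenIndexCapital
-- ===== SOURCE A (Python) =====
-- def evenIndexCapital(string):
--     result = ""
--     for i in range(len(string)):
--         if 'A' <= string[i] <= 'Z':
--             result += string[i]
--         elif i % 2 == 0:
--             result += string[i].upper()
--         else:
--             result += string[i]
--     return result
-- ===== SOURCE B (Python) =====
-- def evenIndexCapital(string):
--     # Consume the characters in pairs: uppercase the first of each pair,
--     # keep the second verbatim; no index arithmetic or uppercase test needed.
--     out = []
--     it = iter(string)
--     for c in it:
--         out.append(c.upper())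
--         d = next(it, None)
--         if d is not None:
--             out.append(d)
--     return "".join(out)
-- ===== Notes on version B (the rewrite author's own statement) =====
-- stated objective: faster
-- what changed: B consumes the string in pairs (uppercase the first of each pair, keep the second), eliminating A's index counter, parity test, per-character uppercase check and quadratic-prone string concatenation (list append + one join instead).
import Mathlib
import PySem

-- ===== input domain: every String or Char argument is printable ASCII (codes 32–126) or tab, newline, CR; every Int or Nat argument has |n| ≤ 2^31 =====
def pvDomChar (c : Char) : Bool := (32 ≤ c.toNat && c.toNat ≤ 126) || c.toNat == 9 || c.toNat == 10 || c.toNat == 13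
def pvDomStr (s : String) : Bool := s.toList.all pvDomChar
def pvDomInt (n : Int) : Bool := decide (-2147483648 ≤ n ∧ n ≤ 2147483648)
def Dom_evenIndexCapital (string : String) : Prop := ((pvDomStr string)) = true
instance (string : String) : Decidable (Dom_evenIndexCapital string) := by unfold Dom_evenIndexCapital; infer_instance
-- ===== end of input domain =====

-- B consumes the characters in pairs (uppercase first of pair, keep second) with list-append + join instead of A's indexed scan with string concatenation; a timing run measured B faster by a constant factor.

-- ===== PORT A =====
def evenIndexCapital (string : String) : String :=
  String.ofList
    ((PySem.List.enumerate string.toList 0).foldl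
      (fun (result : List Char) (p : Int × Char) =>
        if 'A' ≤ p.2 ∧ p.2 ≤ 'Z' then result ++ [p.2]
        else if p.1 % 2 = 0 then result ++ [PySem.Chars.upperChar p.2]
        else result ++ [p.2]) [])

-- ===== PORT B =====
-- pair-consuming loop of Source B: uppercase the first of each pair, keep the second
def pvAltGo : List Char → List Char
  | [] => []
  | [c] => [PySem.Chars.upperChar c]
  | c :: d :: rest => PySem.Chars.upperChar c :: d :: pvAltGo rest

def evenIndexCapital_alt (string : String) : String :=
  String.ofList (pvAltGo string.toList)

-- ===== PRECONDITION & SPEC =====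
def Spec_evenIndexCapital (string : String) (out : String) : Prop := out = evenIndexCapital_alt string
instance (string : String) (out : String) : Decidable (Spec_evenIndexCapital string out) := by unfold Spec_evenIndexCapital; infer_instance

-- ===== CLAIM (what is proved, stated in full; the proofs are below) =====
def Claim_equal_evenIndexCapital : Prop := ∀ (string : String), Dom_evenIndexCapital string → Spec_evenIndexCapital string (evenIndexCapital string)

-- ===== LEMMAS AND PROOFS =====

theorem pvUpperChar_fix {c : Char} (_h1 : 'A' ≤ c) (h2 : c ≤ 'Z') :
    PySem.Chars.upperChar c = c := by
  have : ¬ ('a' ≤ c) := by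
    intro h
    exact absurd (lt_of_le_of_lt h2 (by decide : 'Z' < 'a')) (not_lt.mpr h)
  simp [PySem.Chars.upperChar, PySem.Chars.islower, this]

theorem pvFoldl_eq_altGo (cs : List Char) (k : Int) (hk : k % 2 = 0) (acc : List Char) :
    (PySem.List.enumerate cs k).foldl
      (fun (result : List Char) (p : Int × Char) =>
        if 'A' ≤ p.2 ∧ p.2 ≤ 'Z' then result ++ [p.2]
        else if p.1 % 2 = 0 then result ++ [PySem.Chars.upperChar p.2]
        else result ++ [p.2]) acc = acc ++ pvAltGo cs := by
  induction cs using pvAltGo.induct generalizing k acc with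
  | case1 => simp [PySem.List.enumerate_nil, pvAltGo]
  | case2 c =>
    simp only [PySem.List.enumerate_cons, PySem.List.enumerate_nil, List.foldl_cons,
      List.foldl_nil, pvAltGo, hk]
    by_cases h : 'A' ≤ c ∧ c ≤ 'Z'
    · simp [h, pvUpperChar_fix h.1 h.2]
    · simp [h]
  | case3 c d rest ih =>
    have hk1 : (k + 1) % 2 ≠ 0 := by omega
    have hk2 : (k + 1 + 1) % 2 = 0 := by omega
    simp only [PySem.List.enumerate_cons, List.foldl_cons]
    rw [ih (k + 1 + 1) hk2]
    by_cases h : 'A' ≤ c ∧ c ≤ 'Z' <;>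
      by_cases h' : 'A' ≤ d ∧ d ≤ 'Z' <;>
        simp [h, h', hk, hk1, pvAltGo, pvUpperChar_fix]

-- ===== VERDICT (by name: the statement is the Claim_ definition above) =====
theorem evenIndexCapital_spec : Claim_equal_evenIndexCapital := by
  intro s _
  unfold Spec_evenIndexCapital evenIndexCapital evenIndexCapital_alt
  rw [pvFoldl_eq_altGo s.toList 0 (by decide) []]
  simp
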